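-- pv_equiv track=rewrite | github.com/codeeMadness/Gen-7 | Homework/Hang_Nguyen/practice/Task-2.py | numberCameraPass
-- ===== SOURCE A (Python) =====
-- def numberCameraPass(s):
--     res = 0
--     cameraCnt = 0
--     for c in s:
--         if c == '.':
--             cameraCnt += 1
--         elif c == '<':
--             res += cameraCnt
--
--     cameraCnt = 0
--     for c in reversed(s) :
--         if c == '.':
--             cameraCnt += 1
--         elif c == '>':
--             res += cameraCnt
--     return res
-- ===== SOURCE B (Python) =====
-- def numberCameraPass(s):
--     res = 0
--     dotCount = 0
--     gtCount = 0
--     for c in s: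
--         if c == '.':
--             res += gtCount
--             dotCount += 1
--         elif c == '<':
--             res += dotCount
--         elif c == '>':
--             gtCount += 1
--     return res
-- ===== Notes on version B (the rewrite author's own statement) =====
-- stated objective: simpler
-- what changed: Replaced A's two passes (forward for '<' over preceding dots, then a reversed pass for '>' over following dots) by a single forward pass that keeps a '>'-counter and credits each dot with the '>'s before it, so the reversed pass disappears.
import Mathlib
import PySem

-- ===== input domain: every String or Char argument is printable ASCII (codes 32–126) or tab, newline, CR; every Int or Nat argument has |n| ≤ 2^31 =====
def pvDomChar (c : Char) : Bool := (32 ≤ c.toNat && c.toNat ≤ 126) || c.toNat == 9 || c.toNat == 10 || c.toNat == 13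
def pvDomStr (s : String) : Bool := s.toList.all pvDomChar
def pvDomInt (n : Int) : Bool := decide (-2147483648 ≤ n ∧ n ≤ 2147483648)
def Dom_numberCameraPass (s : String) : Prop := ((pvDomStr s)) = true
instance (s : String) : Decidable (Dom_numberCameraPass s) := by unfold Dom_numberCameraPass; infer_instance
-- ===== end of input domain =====

-- B replaces A's two passes (forward then reversed) by one forward pass with a '>'-counter: simpler, same O(n) cost.

-- ===== PORT A =====
-- first forward pass: state (res, cameraCnt)
def pvPassFwd (st : Int × Int) (l : List Char) : Int × Int :=
  l.foldl (fun st c =>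
    if c = '.' then (st.1, st.2 + 1)
    else if c = '<' then (st.1 + st.2, st.2)
    else st) st

-- second pass over reversed s: state (res, cameraCnt)
def pvPassRev (st : Int × Int) (l : List Char) : Int × Int :=
  l.foldl (fun st c =>
    if c = '.' then (st.1, st.2 + 1)
    else if c = '>' then (st.1 + st.2, st.2)
    else st) st

def numberCameraPass (s : String) : Int :=
  let p1 := pvPassFwd (0, 0) s.toList
  let p2 := pvPassRev (p1.1, 0) s.toList.reverse
  p2.1

-- ===== PORT B =====
-- single pass: state (res, dotCount, gtCount)
def pvPassB (st : Int × Int × Int) (l : List Char) : Int × Int × Int :=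
  l.foldl (fun st c =>
    if c = '.' then (st.1 + st.2.2, st.2.1 + 1, st.2.2)
    else if c = '<' then (st.1 + st.2.1, st.2.1, st.2.2)
    else if c = '>' then (st.1, st.2.1, st.2.2 + 1)
    else st) st

def numberCameraPass_alt (s : String) : Int :=
  (pvPassB (0, 0, 0) s.toList).1

-- ===== PRECONDITION & SPEC =====
def Spec_numberCameraPass (s : String) (out : Int) : Prop := out = numberCameraPass_alt s
instance (s : String) (out : Int) : Decidable (Spec_numberCameraPass s out) := by unfold Spec_numberCameraPass; infer_instance

-- ===== CLAIM (what is proved, stated in full; the proofs are below) =====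
def Claim_equal_numberCameraPass : Prop := ∀ (s : String), Dom_numberCameraPass s → Spec_numberCameraPass s (numberCameraPass s)

-- ===== LEMMAS AND PROOFS =====

-- counts (as Int) and pair sums
def pvDc : List Char → Int
  | [] => 0
  | c :: t => (if c = '.' then 1 else 0) + pvDc t

def pvLc : List Char → Int
  | [] => 0
  | c :: t => (if c = '<' then 1 else 0) + pvLc t

def pvGc : List Char → Int
  | [] => 0
  | c :: t => (if c = '>' then 1 else 0) + pvGc t

-- pairs: '.' before '<'
def pvX : List Char → Int
  | [] => 0
  | c :: t => (if c = '.' then pvLc t else 0) + pvX t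

-- pairs: '.' before '>'
def pvXR : List Char → Int
  | [] => 0
  | c :: t => (if c = '.' then pvGc t else 0) + pvXR t

-- pairs: '>' before '.'
def pvY : List Char → Int
  | [] => 0
  | c :: t => (if c = '>' then pvDc t else 0) + pvY t

theorem pvPassFwd_eq (l : List Char) : ∀ res cnt,
    pvPassFwd (res, cnt) l = (res + cnt * pvLc l + pvX l, cnt + pvDc l) := by
  induction l with
  | nil => intro res cnt; simp [pvPassFwd, pvLc, pvX, pvDc]
  | cons c t ih =>
    intro res cnt
    simp only [pvPassFwd, List.foldl_cons] at *
    split_ifs with h1 h2 <;>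
      simp [pvLc, pvX, pvDc, Prod.mk.injEq, *] <;> and_intros <;> ring

theorem pvPassRev_eq (l : List Char) : ∀ res cnt,
    pvPassRev (res, cnt) l = (res + cnt * pvGc l + pvXR l, cnt + pvDc l) := by
  induction l with
  | nil => intro res cnt; simp [pvPassRev, pvGc, pvXR, pvDc]
  | cons c t ih =>
    intro res cnt
    simp only [pvPassRev, List.foldl_cons] at *
    split_ifs with h1 h2 <;>
      simp [pvGc, pvXR, pvDc, Prod.mk.injEq, *] <;> and_intros <;> ring

theorem pvDc_append (l m : List Char) : pvDc (l ++ m) = pvDc l + pvDc m := by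
  induction l with
  | nil => simp [pvDc]
  | cons c t ih => simp [pvDc, ih]; ring

theorem pvGc_append (l m : List Char) : pvGc (l ++ m) = pvGc l + pvGc m := by
  induction l with
  | nil => simp [pvGc]
  | cons c t ih => simp [pvGc, ih]; ring

theorem pvDc_reverse (l : List Char) : pvDc l.reverse = pvDc l := by
  induction l with
  | nil => rfl
  | cons c t ih => simp [pvDc, List.reverse_cons, pvDc_append, ih]; ring

theorem pvXR_append_singleton (l : List Char) (c : Char) :
    pvXR (l ++ [c]) = pvXR l + (if c = '>' then pvDc l else 0) := by
  induction l with
  | nil => simp [pvXR, pvGc, pvDc]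
  | cons d t ih =>
    simp only [List.cons_append, pvXR, ih, pvGc_append, pvDc]
    split_ifs <;> simp [pvGc, *] <;> ring

theorem pvXR_reverse (l : List Char) : pvXR l.reverse = pvY l := by
  induction l with
  | nil => rfl
  | cons c t ih =>
    simp [List.reverse_cons, pvXR_append_singleton, ih, pvY, pvDc_reverse]
    ring

theorem pvPassB_eq (l : List Char) : ∀ res dot gt,
    pvPassB (res, dot, gt) l =
      (res + dot * pvLc l + gt * pvDc l + pvX l + pvY l, dot + pvDc l, gt + pvGc l) := by
  induction l with
  | nil => intro res dot gt; simp [pvPassB, pvLc, pvDc, pvX, pvY, pvGc]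
  | cons c t ih =>
    intro res dot gt
    simp only [pvPassB, List.foldl_cons] at *
    split_ifs with h1 h2 h3 <;>
      simp [pvLc, pvDc, pvX, pvY, pvGc, Prod.mk.injEq, *] <;> and_intros <;> ring

-- ===== VERDICT (by name: the statement is the Claim_ definition above) =====
theorem numberCameraPass_spec : Claim_equal_numberCameraPass := by
  intro s _
  unfold Spec_numberCameraPass numberCameraPass numberCameraPass_alt
  simp only [pvPassFwd_eq, pvPassRev_eq, pvPassB_eq, pvXR_reverse]
  ring
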